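-- pv_equiv track=rewrite | github.com/rsucco/AdventOfCode2020 | Day5/day5_part2.py | find_my_seat
-- ===== SOURCE A (Python) =====
-- def get_row(boarding_pass):
--     row_info = boarding_pass[:7]
--     possible_rows = range(0, 128)
--     for row_char in row_info:
--         # The row_char will specify whether to take the top half or the bottom half
--         split_point = int(len(possible_rows) / 2)
--         if row_char == 'F':
--             # For the last char, return the correct value
--             if len(possible_rows) <= 2:
--                 return possible_rows[0]
--             # For any of the other chars, split the list along the split point
--             else:
--                 possible_rows = possible_rows[:split_point]
--         else:
--             if len(possible_rows) <= 2:
--                 return possible_rows[-1]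
--             else:
--                 possible_rows = possible_rows[split_point:]
--     # Return -1 as an error signal if the row couldn't be calculated
--     return -1
--
-- def get_column(boarding_pass):
--     column_info = boarding_pass[7:]
--     possible_columns = range(0, 8)
--     for column_char in column_info:
--         split_point = int(len(possible_columns) / 2)
--         if column_char == 'L':
--             if len(possible_columns) <= 2:
--                 return possible_columns[0]
--             else:
--                 possible_columns = possible_columns[:split_point]
--         else:
--             if len(possible_columns) <= 2:
--                 return possible_columns[1]
--             else:
--                 possible_columns = possible_columns[split_point:]
--     return -1
--
-- def get_seat_id(row, column):
--     return row * 8 + column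
--
-- def find_my_seat(data):
--     all_seat_ids = []
--     for boarding_pass in data:
--         all_seat_ids.append(get_seat_id(
--             get_row(boarding_pass), get_column(boarding_pass)))
--     missing_seat_ids = []
--     for i in range(min(all_seat_ids), max(all_seat_ids)):
--         if i not in all_seat_ids:
--             missing_seat_ids.append(i)
--     return missing_seat_ids
-- ===== SOURCE B (Python) =====
-- def seat_id_of(bp):
--     # seat id = 10-bit binary read of the pass (F/L = 0, anything else = 1);
--     # too-short passes get -1 for the missing part, as the halving search would
--     if len(bp) >= 7:
--         row = 0
--         for c in bp[:7]:
--             row = row * 2 + (0 if c == 'F' else 1)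
--     else:
--         row = -1
--     if len(bp) >= 10:
--         col = 0
--         for c in bp[7:10]:
--             col = col * 2 + (0 if c == 'L' else 1)
--     else:
--         col = -1
--     return row * 8 + col
--
-- def find_my_seat(data):
--     s = sorted(seat_id_of(bp) for bp in data)
--     missing = []
--     for lo, hi in zip(s, s[1:]):
--         missing.extend(range(lo + 1, hi))
--     return missing
-- ===== Notes on version B (the rewrite author's own statement) =====
-- stated objective: faster
-- what changed: B computes each seat id directly as a 10-bit binary fold over the pass characters instead of A's range-halving search, and finds the missing ids by sorting the ids once and emitting the gaps between adjacent pairs instead of A's scan of range(min,max) with an O(n) membership test per point.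
import Mathlib
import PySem

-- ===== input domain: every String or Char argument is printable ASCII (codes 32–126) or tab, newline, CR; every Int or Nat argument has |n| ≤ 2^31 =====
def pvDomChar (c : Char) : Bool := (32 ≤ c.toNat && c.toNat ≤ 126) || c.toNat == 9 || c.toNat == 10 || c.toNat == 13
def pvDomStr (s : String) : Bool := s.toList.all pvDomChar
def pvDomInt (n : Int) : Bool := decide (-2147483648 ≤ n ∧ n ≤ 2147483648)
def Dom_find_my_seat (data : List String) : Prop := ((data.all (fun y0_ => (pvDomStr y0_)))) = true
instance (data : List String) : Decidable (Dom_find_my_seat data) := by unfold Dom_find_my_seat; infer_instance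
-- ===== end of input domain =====

-- B replaces A's binary-halving row/column search with a direct bit-fold over the pass
-- characters, and A's scan of range(min, max) with membership tests with a
-- sort-then-gap-walk over adjacent pairs of the sorted seat ids (objective: faster).

-- ===== PORT A =====
-- Python's `range(start, stop)` state is represented exactly by its endpoints (start, stop):
-- slicing a range yields a range (`r[:k]` = range(start, start+k), `r[k:]` = range(start+k, stop)),
-- len = stop - start (start ≤ stop in every reachable state), r[0] = start, r[-1] = stop - 1,
-- r[1] = start + 1 (len ≥ 2 whenever those are read, so no IndexError arises).
def rowLoop : List Char → Int → Int → Int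
  | [], _, _ => -1
  | c :: cs, start, stop =>
    -- int(len/2) on a nonnegative len is floor division
    let split_point := PySem.Int.floordiv (stop - start) 2
    if c = 'F' then
      if stop - start ≤ 2 then start
      else rowLoop cs start (start + split_point)
    else
      if stop - start ≤ 2 then stop - 1
      else rowLoop cs (start + split_point) stop

def get_row (boarding_pass : String) : Int :=
  rowLoop (PySem.List.slice boarding_pass.toList none (some 7)) 0 128

def colLoop : List Char → Int → Int → Int
  | [], _, _ => -1
  | c :: cs, start, stop =>
    let split_point := PySem.Int.floordiv (stop - start) 2
    if c = 'L' then
      if stop - start ≤ 2 then start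
      else colLoop cs start (start + split_point)
    else
      if stop - start ≤ 2 then start + 1
      else colLoop cs (start + split_point) stop

def get_column (boarding_pass : String) : Int :=
  colLoop (PySem.List.slice boarding_pass.toList (some 7) none) 0 8

def get_seat_id (row : Int) (column : Int) : Int := row * 8 + column

def find_my_seat (data : List String) : List Int :=
  let all_seat_ids :=
    data.foldl (fun acc bp => acc ++ [get_seat_id (get_row bp) (get_column bp)]) []
  match PySem.List.min? all_seat_ids (fun x => x), PySem.List.max? all_seat_ids (fun x => x) with
  | some mn, some mx =>
      (PySem.List.pyRange mn mx 1).foldl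
        (fun acc i => if i ∉ all_seat_ids then acc ++ [i] else acc) []
  | _, _ => []   -- unreachable under Pre_: min([]) raises ValueError

-- ===== PORT B =====
-- seat id in Source B: a 10-bit binary read of the pass (F/L = 0, anything else = 1),
-- with -1 for a part the pass is too short to determine; missing ids: gaps between
-- adjacent elements of the sorted id list.
def seat_id_of (bp : String) : Int :=
  let cs := bp.toList
  let row : Int := if 7 ≤ cs.length then
      (cs.take 7).foldl (fun r c => r * 2 + (if c = 'F' then 0 else 1)) 0
    else -1
  let col : Int := if 10 ≤ cs.length then
      ((cs.drop 7).take 3).foldl (fun r c => r * 2 + (if c = 'L' then 0 else 1)) 0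
    else -1
  row * 8 + col

def find_my_seat_alt (data : List String) : List Int :=
  let s := PySem.List.sorted (data.map seat_id_of) (fun x => x) false
  (s.zip (s.drop 1)).foldl (fun acc p => acc ++ PySem.List.pyRange (p.1 + 1) p.2 1) []

-- ===== PRECONDITION & SPEC =====
-- Pre_ excludes only the empty list, on which A raises ValueError (min of an empty sequence).
def Pre_find_my_seat (data : List String) : Prop := data ≠ []
instance (data : List String) : Decidable (Pre_find_my_seat data) := by
  unfold Pre_find_my_seat; infer_instance

def pvWitness_find_my_seat : List String := ["FBFBBFFRLR", "FFFFFFFLLL"]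

def Spec_find_my_seat (data : List String) (out : List Int) : Prop := out = find_my_seat_alt data
instance (data : List String) (out : List Int) : Decidable (Spec_find_my_seat data out) := by
  unfold Spec_find_my_seat; infer_instance

-- ===== CLAIM (what is proved, stated in full; the proofs are below) =====
def Claim_equal_find_my_seat : Prop := ∀ (data : List String), Dom_find_my_seat data → Pre_find_my_seat data → Spec_find_my_seat data (find_my_seat data)

-- ===== LEMMAS AND PROOFS =====

-- shifting the accumulator of a bit-fold: foldl f b l = b * 2^len + foldl f 0 l
theorem pv_foldl_bit_shift (g : Char → Int) : ∀ (l : List Char) (b : Int),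
    l.foldl (fun r c => r * 2 + g c) b = b * 2 ^ l.length + l.foldl (fun r c => r * 2 + g c) 0 := by
  intro l
  induction l with
  | nil => intro b; simp
  | cons c l ih =>
    intro b
    simp only [List.foldl_cons, List.length_cons]
    rw [ih (b * 2 + g c), ih (0 * 2 + g c)]
    ring

-- A's halving loop over range(start, start + 2^k) consumes exactly k characters and
-- returns start plus the k-bit binary value of those characters (F = 0, else 1)
theorem pv_rowLoop_pow : ∀ (k : Nat), 1 ≤ k → ∀ (cs : List Char) (start : Int),
    rowLoop cs start (start + 2 ^ k) =
      if k ≤ cs.length then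
        start + (cs.take k).foldl (fun r c => r * 2 + (if c = 'F' then 0 else 1)) 0
      else -1 := by
  intro k
  induction k with
  | zero => omega
  | succ k ih =>
    intro _ cs start
    cases cs with
    | nil => simp [rowLoop]
    | cons c cs =>
      have hsplit : PySem.Int.floordiv (start + 2 ^ (k + 1) - start) 2 = 2 ^ k := by
        rw [PySem.Int.floordiv_eq_ediv_of_pos (by norm_num)]
        have h2 : start + 2 ^ (k + 1) - start = 2 ^ k * 2 := by ring
        rw [h2, Int.mul_ediv_cancel _ (by norm_num)]
      by_cases hk1 : 1 ≤ k
      · -- len = 2^(k+1) ≥ 4 > 2: split and recurse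
        have hbig : ¬ (start + 2 ^ (k + 1) - start ≤ 2) := by
          have h4 : (4 : Int) ≤ 2 ^ (k + 1) := by
            calc (4 : Int) = 2 ^ 2 := by norm_num
            _ ≤ 2 ^ (k + 1) := pow_le_pow_right₀ (by norm_num) (by omega)
          omega
        have ih1 := ih hk1 cs start
        have ih2 := ih hk1 cs (start + 2 ^ k)
        rw [show start + 2 ^ k + 2 ^ k = start + 2 ^ (k + 1) from by ring] at ih2
        simp only [rowLoop, hsplit, hbig, if_false, List.length_cons,
          List.take_succ_cons, List.foldl_cons]
        by_cases hc : c = 'F'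
        · rw [if_pos hc, ih1]
          by_cases hlen : k ≤ cs.length
          · rw [if_pos hlen, if_pos (by omega)]
            simp [hc]
          · rw [if_neg hlen, if_neg (by omega)]
        · rw [if_neg hc, ih2]
          by_cases hlen : k ≤ cs.length
          · rw [if_pos hlen, if_pos (by omega), if_neg hc,
              pv_foldl_bit_shift (fun c => if c = 'F' then 0 else 1) (cs.take k) (0 * 2 + 1),
              List.length_take]
            have hmin : min k cs.length = k := by omega
            rw [hmin]
            ring
          · rw [if_neg hlen, if_neg (by omega)]
      · -- k = 0: len = 2, return directly
        have hk0 : k = 0 := by omega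
        subst hk0
        by_cases hc : c = 'F'
        · simp [rowLoop, hc]
        · simp [rowLoop, hc]
          omega

-- the same statement for the column loop (different test character)
theorem pv_colLoop_pow : ∀ (k : Nat), 1 ≤ k → ∀ (cs : List Char) (start : Int),
    colLoop cs start (start + 2 ^ k) =
      if k ≤ cs.length then
        start + (cs.take k).foldl (fun r c => r * 2 + (if c = 'L' then 0 else 1)) 0
      else -1 := by
  intro k
  induction k with
  | zero => omega
  | succ k ih =>
    intro _ cs start
    cases cs with
    | nil => simp [colLoop]
    | cons c cs =>
      have hsplit : PySem.Int.floordiv (start + 2 ^ (k + 1) - start) 2 = 2 ^ k := by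
        rw [PySem.Int.floordiv_eq_ediv_of_pos (by norm_num)]
        have h2 : start + 2 ^ (k + 1) - start = 2 ^ k * 2 := by ring
        rw [h2, Int.mul_ediv_cancel _ (by norm_num)]
      by_cases hk1 : 1 ≤ k
      · have hbig : ¬ (start + 2 ^ (k + 1) - start ≤ 2) := by
          have h4 : (4 : Int) ≤ 2 ^ (k + 1) := by
            calc (4 : Int) = 2 ^ 2 := by norm_num
            _ ≤ 2 ^ (k + 1) := pow_le_pow_right₀ (by norm_num) (by omega)
          omega
        have ih1 := ih hk1 cs start
        have ih2 := ih hk1 cs (start + 2 ^ k)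
        rw [show start + 2 ^ k + 2 ^ k = start + 2 ^ (k + 1) from by ring] at ih2
        simp only [colLoop, hsplit, hbig, if_false, List.length_cons,
          List.take_succ_cons, List.foldl_cons]
        by_cases hc : c = 'L'
        · rw [if_pos hc, ih1]
          by_cases hlen : k ≤ cs.length
          · rw [if_pos hlen, if_pos (by omega)]
            simp [hc]
          · rw [if_neg hlen, if_neg (by omega)]
        · rw [if_neg hc, ih2]
          by_cases hlen : k ≤ cs.length
          · rw [if_pos hlen, if_pos (by omega), if_neg hc,
              pv_foldl_bit_shift (fun c => if c = 'L' then 0 else 1) (cs.take k) (0 * 2 + 1),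
              List.length_take]
            have hmin : min k cs.length = k := by omega
            rw [hmin]
            ring
          · rw [if_neg hlen, if_neg (by omega)]
      · have hk0 : k = 0 := by omega
        subst hk0
        by_cases hc : c = 'L'
        · simp [colLoop, hc]
        · simp [colLoop, hc]

theorem pv_get_row_eq (bp : String) : get_row bp =
    if 7 ≤ bp.toList.length then
      (bp.toList.take 7).foldl (fun r c => r * 2 + (if c = 'F' then 0 else 1)) 0
    else -1 := by
  unfold get_row
  have h7 : PySem.List.slice bp.toList none (some 7) = bp.toList.take 7 := by
    exact_mod_cast PySem.List.slice_to_natCast bp.toList 7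
  rw [h7, show (128 : Int) = 0 + 2 ^ 7 from by norm_num, pv_rowLoop_pow 7 (by norm_num)]
  simp only [List.length_take, List.take_take, Nat.min_self]
  by_cases h : 7 ≤ bp.toList.length
  · rw [if_pos (by omega), if_pos h, zero_add]
  · rw [if_neg (by omega), if_neg h]

theorem pv_get_column_eq (bp : String) : get_column bp =
    if 10 ≤ bp.toList.length then
      ((bp.toList.drop 7).take 3).foldl (fun r c => r * 2 + (if c = 'L' then 0 else 1)) 0
    else -1 := by
  unfold get_column
  have h7 : PySem.List.slice bp.toList (some 7) none = bp.toList.drop 7 := by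
    exact_mod_cast PySem.List.slice_from_natCast bp.toList 7
  rw [h7, show (8 : Int) = 0 + 2 ^ 3 from by norm_num, pv_colLoop_pow 3 (by norm_num)]
  simp only [List.length_drop]
  by_cases h : 10 ≤ bp.toList.length
  · rw [if_pos (by omega), if_pos h, zero_add]
  · rw [if_neg (by omega), if_neg h]

-- per boarding pass, A's seat id equals B's bit-fold seat id
theorem pv_seat_eq (bp : String) :
    get_seat_id (get_row bp) (get_column bp) = seat_id_of bp := by
  rw [get_seat_id, pv_get_row_eq, pv_get_column_eq]
  rfl

-- every element of a list sorted nondecreasingly is ≤ its last element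
theorem pv_le_getLast (s : List Int) (hp : s.Pairwise (· ≤ ·)) (h : s ≠ []) :
    ∀ x ∈ s, x ≤ s.getLast h := by
  induction s with
  | nil => simp at h
  | cons a l ih =>
    intro x hx
    cases l with
    | nil =>
      simp only [List.mem_singleton] at hx
      simp [hx]
    | cons b t =>
      rw [List.getLast_cons (by simp)]
      rcases List.mem_cons.mp hx with rfl | hx
      · exact le_trans (List.rel_of_pairwise_cons hp (List.mem_cons_self ..))
          (ih (List.pairwise_cons.mp hp).2 (by simp) b (List.mem_cons_self ..))
      · exact ih (List.pairwise_cons.mp hp).2 (by simp) x hx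

-- the gap-walk over adjacent pairs of a sorted list IS the filtered range scan
theorem pv_gaps (a : Int) (l : List Int) (hp : (a :: l).Pairwise (· ≤ ·)) :
    ((a :: l).zip l).flatMap (fun p => PySem.List.pyRange (p.1 + 1) p.2 1)
      = (PySem.List.pyRange a ((a :: l).getLast (by simp)) 1).filter
          (fun i => decide (i ∉ a :: l)) := by
  induction l generalizing a with
  | nil => simp [PySem.List.pyRange_one_eq_nil (le_refl a)]
  | cons b t ih =>
    have hab : a ≤ b := List.rel_of_pairwise_cons hp (List.mem_cons_self ..)
    have hp' : (b :: t).Pairwise (· ≤ ·) := (List.pairwise_cons.mp hp).2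
    have ht : ∀ x ∈ t, b ≤ x := fun x hx => List.rel_of_pairwise_cons hp' hx
    have hbl : b ≤ (b :: t).getLast (by simp) :=
      pv_le_getLast _ hp' (by simp) b (List.mem_cons_self ..)
    have hlast : (a :: b :: t).getLast (by simp) = (b :: t).getLast (by simp) :=
      List.getLast_cons (by simp)
    rw [hlast, PySem.List.pyRange_one_append a b ((b :: t).getLast (by simp)) hab hbl,
      List.filter_append, List.zip_cons_cons, List.flatMap_cons, ih b hp']
    have e1 : (PySem.List.pyRange a b 1).filter (fun i => decide (i ∉ a :: b :: t))
        = PySem.List.pyRange (a + 1) b 1 := by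
      by_cases hlt : a < b
      · rw [PySem.List.pyRange_one_cons hlt, List.filter_cons]
        have hmem : (decide (a ∉ a :: b :: t)) = false := by simp
        rw [hmem]
        simp only [Bool.false_eq_true, if_false]
        apply List.filter_eq_self.mpr
        intro i hi
        have hb := PySem.List.mem_pyRange_one.mp hi
        refine decide_eq_true ?_
        simp only [List.mem_cons, not_or]
        refine ⟨by omega, by omega, fun hmem2 => ?_⟩
        exact absurd (ht i hmem2) (by omega)
      · rw [PySem.List.pyRange_one_eq_nil (by omega), PySem.List.pyRange_one_eq_nil (by omega)]
        simp
    have e2 : (PySem.List.pyRange b ((b :: t).getLast (by simp)) 1).filter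
          (fun i => decide (i ∉ a :: b :: t))
        = (PySem.List.pyRange b ((b :: t).getLast (by simp)) 1).filter
          (fun i => decide (i ∉ b :: t)) := by
      apply List.filter_congr
      intro i hi
      have hbi : b ≤ i := (PySem.List.mem_pyRange_one.mp hi).1
      rw [decide_eq_decide]
      refine not_congr ?_
      simp only [List.mem_cons]
      constructor
      · rintro (rfl | h)
        · left; omega
        · exact h
      · exact fun h => Or.inr h
    rw [e1, e2]

theorem find_my_seat_spec : Claim_equal_find_my_seat := by
  intro data _ hpre
  show find_my_seat data = find_my_seat_alt data
  have hidsA : data.foldl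
      (fun acc bp => acc ++ [get_seat_id (get_row bp) (get_column bp)]) []
      = data.map (fun bp => get_seat_id (get_row bp) (get_column bp)) := by
    simpa using PySem.List.foldl_append_singleton_eq_map
      (fun bp => get_seat_id (get_row bp) (get_column bp)) data []
  have hmapeq : data.map seat_id_of
      = data.map (fun bp => get_seat_id (get_row bp) (get_column bp)) :=
    List.map_congr_left (fun bp _ => (pv_seat_eq bp).symm)
  have hne : data.map (fun bp => get_seat_id (get_row bp) (get_column bp)) ≠ [] := by
    simpa using hpre
  set ids := data.map (fun bp => get_seat_id (get_row bp) (get_column bp)) with hidsdef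
  unfold find_my_seat find_my_seat_alt
  simp only [hidsA, hmapeq]
  cases hmin : PySem.List.min? ids (fun x => x) with
  | none => exact absurd ((PySem.List.min?_eq_none_iff ids _).mp hmin) hne
  | some mn =>
  cases hmax : PySem.List.max? ids (fun x => x) with
  | none => exact absurd ((PySem.List.max?_eq_none_iff ids _).mp hmax) hne
  | some mx =>
  cases hs : PySem.List.sorted ids (fun x => x) false with
  | nil =>
    exact absurd ((PySem.List.sorted_eq_nil_iff ids (fun x => x) false).mp hs) hne
  | cons a l =>
  have hpair : (a :: l).Pairwise (· ≤ ·) := by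
    have := PySem.List.sorted_pairwise ids (fun x => x)
    rw [hs] at this
    exact this
  have hmem_s : ∀ x, x ∈ a :: l ↔ x ∈ ids := by
    intro x
    rw [← hs]
    exact PySem.List.mem_sorted ids (fun x => x) false x
  -- mn is the head of the sorted list
  have hmna : mn = a := by
    have h1 : a ≤ mn := PySem.List.key_head_sorted_le ids (fun x => x) hs mn
      (PySem.List.min?_mem hmin)
    have h2 : mn ≤ a := PySem.List.min?_isMin hmin a ((hmem_s a).mp (List.mem_cons_self ..))
    omega
  -- mx is the last of the sorted list
  have hmxl : mx = (a :: l).getLast (by simp) := by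
    have h1 : mx ≤ (a :: l).getLast (by simp) :=
      pv_le_getLast _ hpair (by simp) mx ((hmem_s mx).mpr (PySem.List.max?_mem hmax))
    have h2 : (a :: l).getLast (by simp) ≤ mx :=
      PySem.List.max?_isMax hmax _ ((hmem_s _).mp (List.getLast_mem (by simp)))
    omega
  simp only [PySem.List.foldl_append_ite_eq_filter (fun i => i ∉ ids),
    PySem.List.foldl_append_eq_flatMap, List.nil_append]
  have hdrop : (a :: l).drop 1 = l := rfl
  rw [hdrop, pv_gaps a l hpair, hmna, hmxl]
  apply (List.filter_congr ?_).symm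
  intro i _
  rw [decide_eq_decide]
  exact not_congr (hmem_s i)
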